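-- pv_equiv track=rewrite | github.com/ShredderL/RAPS | Contest 7/Car or Dog.py | CatOrDog
-- ===== SOURCE A (Python) =====
-- def CatOrDog(word):
--     catLetters = 0
--     dogLetters = 0
--     word = word.lower()
--
--     for i in word:
--         if i == 'c' or i == 'a' or i == 't':
--             catLetters += 1
--
--         elif i == 'd' or i == 'o' or i == 'g':
--             dogLetters += 1
--
--     if dogLetters > catLetters:
--         result = 'DOG'
--     elif catLetters > dogLetters:
--         result = 'CAT'
--     else:
--         result = 'NEITHER'
--
--     return result
-- ===== SOURCE B (Python) =====
-- def CatOrDog(word):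
--     w = word.lower()
--     catLetters = sum(w.count(c) for c in 'cat')
--     dogLetters = sum(w.count(c) for c in 'dog')
--     return 'DOG' if dogLetters > catLetters else 'CAT' if catLetters > dogLetters else 'NEITHER'
-- ===== Notes on version B (the rewrite author's own statement) =====
-- stated objective: faster
-- what changed: Replaced the single per-character membership-testing Python loop with six targeted str.count scans (summed per animal word) and a conditional-expression result; str.count runs at C speed.
import Mathlib
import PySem

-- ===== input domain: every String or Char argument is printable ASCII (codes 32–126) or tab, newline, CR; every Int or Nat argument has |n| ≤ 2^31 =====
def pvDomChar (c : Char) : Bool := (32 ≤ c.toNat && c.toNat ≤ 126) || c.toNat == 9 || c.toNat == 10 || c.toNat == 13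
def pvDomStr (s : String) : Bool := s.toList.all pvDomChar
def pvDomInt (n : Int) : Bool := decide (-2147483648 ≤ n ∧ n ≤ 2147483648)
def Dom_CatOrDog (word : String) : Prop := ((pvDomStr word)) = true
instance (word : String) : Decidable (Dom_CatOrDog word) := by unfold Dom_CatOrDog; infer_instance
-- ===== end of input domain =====

-- ===== PORT A =====
-- A: one pass over the lowered word with two accumulators, then a three-way comparison.
def CatOrDog (word : String) : String :=
  let w := (PySem.Str.lower word).toList
  let s := w.foldl (fun (p : Int × Int) i =>
    if i == 'c' || i == 'a' || i == 't' then (p.1 + 1, p.2)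
    else if i == 'd' || i == 'o' || i == 'g' then (p.1, p.2 + 1)
    else p) (0, 0)
  if s.2 > s.1 then "DOG" else if s.1 > s.2 then "CAT" else "NEITHER"

-- ===== PORT B =====
-- B: per-letter count scans of the lowered word (w.count(c) summed over 'cat' and 'dog').
def CatOrDog_alt (word : String) : String :=
  let w := (PySem.Str.lower word).toList
  let catLetters : Int := ("cat".toList.map (fun c => (w.count c : Int))).sum
  let dogLetters : Int := ("dog".toList.map (fun c => (w.count c : Int))).sum
  if dogLetters > catLetters then "DOG"
  else if catLetters > dogLetters then "CAT" else "NEITHER"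

-- ===== PRECONDITION & SPEC =====
def Spec_CatOrDog (word : String) (out : String) : Prop := out = CatOrDog_alt word
instance (word : String) (out : String) : Decidable (Spec_CatOrDog word out) := by unfold Spec_CatOrDog; infer_instance

-- ===== CLAIM (what is proved, stated in full; the proofs are below) =====
def Claim_equal_CatOrDog : Prop := ∀ (word : String), Dom_CatOrDog word → Spec_CatOrDog word (CatOrDog word)

-- ===== LEMMAS AND PROOFS =====

theorem catdog_loop (l : List Char) (a b : Int) :
    l.foldl (fun (p : Int × Int) i =>
      if i == 'c' || i == 'a' || i == 't' then (p.1 + 1, p.2)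
      else if i == 'd' || i == 'o' || i == 'g' then (p.1, p.2 + 1)
      else p) (a, b)
    = (a + (l.count 'c' + l.count 'a' + l.count 't' : Int),
       b + (l.count 'd' + l.count 'o' + l.count 'g' : Int)) := by
  induction l generalizing a b with
  | nil => simp
  | cons x xs ih =>
    simp only [List.foldl_cons, List.count_cons]
    by_cases h1 : (x == 'c' || x == 'a' || x == 't') = true
    · rw [if_pos h1, ih]
      simp only [Bool.or_eq_true, beq_iff_eq] at h1
      rcases h1 with (h | h) | h <;> subst h <;> simp <;> push_cast <;> ring
    · rw [if_neg h1]
      by_cases h2 : (x == 'd' || x == 'o' || x == 'g') = true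
      · rw [if_pos h2, ih]
        simp only [Bool.or_eq_true, beq_iff_eq] at h2
        rcases h2 with (h | h) | h <;> subst h <;> simp <;> push_cast <;> ring
      · rw [if_neg h2, ih]
        simp only [Bool.or_eq_true, beq_iff_eq, not_or] at h1 h2
        obtain ⟨⟨c1, c2⟩, c3⟩ := h1
        obtain ⟨⟨d1, d2⟩, d3⟩ := h2
        simp [beq_iff_eq, c1, c2, c3, d1, d2, d3]

-- ===== VERDICT (by name: the statement is the Claim_ definition above) =====
theorem CatOrDog_spec : Claim_equal_CatOrDog := by
  intro word _
  show CatOrDog word = CatOrDog_alt word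
  unfold CatOrDog CatOrDog_alt
  simp only [catdog_loop]
  have h : ("cat".toList = ['c','a','t'] ∧ "dog".toList = ['d','o','g']) := by decide
  rw [h.1, h.2]
  simp only [List.map_cons, List.map_nil, List.sum_cons, List.sum_nil, add_zero, zero_add]
  ring_nf
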